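-- pv_equiv track=rewrite | github.com/sameersaini/Hackerank | NumberTheory/Equations.py | get_multiplicity
-- ===== SOURCE A (Python) =====
-- def get_multiplicity(primes,n):
--     total=1
--     multiplicity=[1 for i in range(n+1)]
--     for i in range(2,len(primes)):
--         if primes[i]==1:
--             temp=n
--             power=0
--             while temp>1:
--                 power += temp//i
--                 temp = temp//i
--             total *= (2*power+1)
--     return total
-- ===== SOURCE B (Python) =====
-- def get_multiplicity(primes, n):
--     total = 1
--     for i, flag in enumerate(primes):
--         if i >= 2 and flag == 1:
--             s, m = 0, n
--             while m > 0:
--                 s += m % i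
--                 m //= i
--             power = (n - s) // (i - 1) if n > 0 else 0
--             total *= 2 * power + 1
--     return total
-- ===== Notes on version B (the rewrite author's own statement) =====
-- stated objective: alternative
-- what changed: Replaces A's inner repeated-division quotient-summing while-loop by Legendre's digit-sum identity (power = (n - base-i digit sum of n)//(i-1)), rewrites the outer scan over enumerate(primes), and drops A's unused O(n) multiplicity list; similar overall cost when the primes list dominates.
import Mathlib
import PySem

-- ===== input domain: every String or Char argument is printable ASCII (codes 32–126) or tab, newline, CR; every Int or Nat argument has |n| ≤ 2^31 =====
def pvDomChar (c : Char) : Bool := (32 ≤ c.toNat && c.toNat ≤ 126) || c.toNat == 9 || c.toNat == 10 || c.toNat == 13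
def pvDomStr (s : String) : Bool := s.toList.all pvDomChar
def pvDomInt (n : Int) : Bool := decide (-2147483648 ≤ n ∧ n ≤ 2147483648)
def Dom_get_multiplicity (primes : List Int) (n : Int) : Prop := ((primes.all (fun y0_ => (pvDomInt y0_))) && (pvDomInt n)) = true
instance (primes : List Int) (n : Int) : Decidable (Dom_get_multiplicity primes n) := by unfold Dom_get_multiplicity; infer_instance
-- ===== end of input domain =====

-- B derives each prime's exponent by Legendre's digit-sum identity (power = (n - digitsum_base_i(n)) / (i-1))
-- instead of A's quotient-summing loop, and drops A's unused list (objective: alternative algorithm, similar cost).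

-- ===== PORT A =====
-- A's inner 'while temp>1' loop; fuel is only a totality guard (temp.toNat steps always suffice).
def pvPowLoopA (i : Int) : Nat → Int → Int → Int
  | 0, _, power => power
  | f + 1, temp, power =>
    if temp > 1 then
      pvPowLoopA i f (PySem.Int.floordiv temp i) (power + PySem.Int.floordiv temp i)
    else power

def get_multiplicity (primes : List Int) (n : Int) : Int :=
  let total : Int := 1
  let _multiplicity : List Int := (PySem.List.pyRange 0 (n + 1) 1).map (fun _ => (1 : Int))
  (PySem.List.pyRange 2 (primes.length : Int) 1).foldl
    (fun total i =>
      if PySem.List.pyGetD primes i 0 = 1 then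
        total * (2 * pvPowLoopA i n.toNat n 0 + 1)
      else total)
    total

-- ===== PORT B =====
-- B's inner 'while m>0' digit-sum loop; fuel is only a totality guard (m.toNat steps always suffice).
def pvDigitLoopB (i : Int) : Nat → Int → Int → Int
  | 0, _, s => s
  | f + 1, m, s =>
    if m > 0 then
      pvDigitLoopB i f (PySem.Int.floordiv m i) (s + PySem.Int.mod m i)
    else s

def get_multiplicity_alt (primes : List Int) (n : Int) : Int :=
  (PySem.List.enumerate primes 0).foldl
    (fun total p =>
      if 2 ≤ p.1 ∧ p.2 = 1 then
        let s := pvDigitLoopB p.1 n.toNat n 0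
        let power := if n > 0 then PySem.Int.floordiv (n - s) (p.1 - 1) else 0
        total * (2 * power + 1)
      else total)
    1

-- ===== PRECONDITION & SPEC =====
def Spec_get_multiplicity (primes : List Int) (n : Int) (out : Int) : Prop := out = get_multiplicity_alt primes n
instance (primes : List Int) (n : Int) (out : Int) : Decidable (Spec_get_multiplicity primes n out) := by unfold Spec_get_multiplicity; infer_instance

-- ===== CLAIM (what is proved, stated in full; the proofs are below) =====
def Claim_equal_get_multiplicity : Prop := ∀ (primes : List Int) (n : Int), Dom_get_multiplicity primes n → Spec_get_multiplicity primes n (get_multiplicity primes n)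

-- ===== LEMMAS AND PROOFS =====

theorem pvPowLoopA_acc (i : Int) : ∀ (f : Nat) (t p : Int),
    pvPowLoopA i f t p = p + pvPowLoopA i f t 0 := by
  intro f
  induction f with
  | zero => intro t p; simp [pvPowLoopA]
  | succ f ih =>
    intro t p
    by_cases h : t > 1
    · simp only [pvPowLoopA, if_pos h]
      rw [ih _ (p + PySem.Int.floordiv t i), ih _ (0 + PySem.Int.floordiv t i)]
      ring
    · simp [pvPowLoopA, h]

theorem pvDigitLoopB_acc (i : Int) : ∀ (f : Nat) (t s : Int),
    pvDigitLoopB i f t s = s + pvDigitLoopB i f t 0 := by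
  intro f
  induction f with
  | zero => intro t s; simp [pvDigitLoopB]
  | succ f ih =>
    intro t s
    by_cases h : t > 0
    · simp only [pvDigitLoopB, if_pos h]
      rw [ih _ (s + PySem.Int.mod t i), ih _ (0 + PySem.Int.mod t i)]
      ring
    · simp [pvDigitLoopB, h]

theorem pvDigitLoopB_nonpos (i : Int) (f : Nat) (t s : Int) (h : ¬ t > 0) :
    pvDigitLoopB i f t s = s := by
  cases f <;> simp [pvDigitLoopB, h]

theorem pvPowLoopA_nonpos (i : Int) (f : Nat) (t p : Int) (h : ¬ t > 1) :
    pvPowLoopA i f t p = p := by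
  cases f <;> simp [pvPowLoopA, h]

-- Legendre: t - digitsum_base_i(t) = (i-1) * (sum of successive quotients of t by i)
theorem pv_legendre (i : Int) (hi : 2 ≤ i) :
    ∀ (k : Nat) (t : Int), 0 ≤ t → t.toNat ≤ k →
      t - pvDigitLoopB i k t 0 = (i - 1) * pvPowLoopA i k t 0 := by
  intro k
  induction k with
  | zero =>
    intro t ht hk
    have : t = 0 := by omega
    subst this
    simp [pvDigitLoopB, pvPowLoopA]
  | succ k ih =>
    intro t ht hk
    by_cases h0 : t > 0
    · -- digit loop fires
      have hipos : (0 : Int) < i := by omega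
      set q := PySem.Int.floordiv t i with hq
      set r := PySem.Int.mod t i with hr
      have hqr : q * i + r = t := PySem.Int.floordiv_mul_add_mod t i
      have hq0 : 0 ≤ q := by
        rw [hq, PySem.Int.floordiv_eq_ediv_of_pos hipos]
        exact Int.ediv_nonneg ht (le_of_lt hipos)
      have hqlt : q < t := by
        rw [hq, PySem.Int.floordiv_lt_iff_lt_mul hipos]
        nlinarith
      have hk' : q.toNat ≤ k := by omega
      have IH := ih q hq0 hk'
      by_cases h1 : t > 1
      · -- both loops fire
        simp only [pvDigitLoopB, if_pos h0, pvPowLoopA, if_pos h1, ← hq, ← hr]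
        rw [pvDigitLoopB_acc, pvPowLoopA_acc]
        nlinarith [IH]
      · -- t = 1: digit loop fires once, power loop is 0
        have ht1 : t = 1 := by omega
        subst ht1
        have hq1 : q = 0 := by
          rw [hq, PySem.Int.floordiv_eq_ediv_of_pos hipos]
          exact Int.ediv_eq_zero_of_lt (by omega) (by omega)
        have hr1 : r = 1 := by rw [hq1, zero_mul] at hqr; omega
        simp only [pvDigitLoopB, if_pos h0, ← hq, ← hr, hq1, hr1]
        rw [pvDigitLoopB_nonpos i k 0 _ (by omega)]
        rw [pvPowLoopA_nonpos i (k + 1) 1 0 (by omega)]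
        ring
    · -- t = 0
      have : t = 0 := by omega
      subst this
      rw [pvDigitLoopB_nonpos i (k+1) 0 0 (by omega),
          pvPowLoopA_nonpos i (k+1) 0 0 (by omega)]
      ring

-- per-prime: B's closed-form power equals A's quotient-sum power
theorem pv_power_eq (i : Int) (hi : 2 ≤ i) (n : Int) :
    (if n > 0 then PySem.Int.floordiv (n - pvDigitLoopB i n.toNat n 0) (i - 1) else 0)
      = pvPowLoopA i n.toNat n 0 := by
  by_cases hn : n > 0
  · rw [if_pos hn]
    have h := pv_legendre i hi n.toNat n (by omega) (le_refl _)
    rw [h, PySem.Int.floordiv_eq_ediv_of_pos (by omega : (0:Int) < i - 1),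
        Int.mul_ediv_cancel_left _ (by omega : i - 1 ≠ 0)]
  · rw [if_neg hn, pvPowLoopA_nonpos i n.toNat n 0 (by omega)]

-- ===== VERDICT (by name: the statement is the Claim_ definition above) =====
theorem get_multiplicity_spec : Claim_equal_get_multiplicity := by
  intro primes n _
  unfold Spec_get_multiplicity get_multiplicity get_multiplicity_alt
  rw [PySem.List.enumerate_eq_map_pyRange (d := 0), List.foldl_map]
  dsimp only
  simp only [PySem.List.len_eq]
  by_cases hlen : (2 : Int) ≤ (primes.length : Int)
  · rw [PySem.List.pyRange_one_append 0 2 (primes.length : Int) (by omega) hlen,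
        List.foldl_append]
    have h01 : PySem.List.pyRange 0 2 1 = [0, 1] := by decide
    rw [h01]
    dsimp only [List.foldl_cons, List.foldl_nil]
    norm_num
    apply PySem.List.foldl_congr_mem
    intro acc x hx
    have hx2 : (2 : Int) ≤ x := (PySem.List.mem_pyRange_one.mp hx).1
    rw [← pv_power_eq x hx2 n]
    simp [hx2, mul_ite]
  · have hA : PySem.List.pyRange 2 (primes.length : Int) 1 = [] :=
      PySem.List.pyRange_one_eq_nil (by omega)
    rw [hA]
    dsimp only [List.foldl_nil]
    have h01 : primes.length = 0 ∨ primes.length = 1 := by omega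
    rcases h01 with h | h <;> rw [h]
    · rw [show ((0 : Nat) : Int) = (0 : Int) from rfl,
          PySem.List.pyRange_one_eq_nil (by omega)]
      rfl
    · have h1 : PySem.List.pyRange 0 ((1 : Nat) : Int) 1 = [0] := by decide
      rw [h1]
      norm_num
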